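-- pv_equiv track=rewrite | github.com/GiIZbestgroup/grafy1 | lab03/Graph.py | get_centre
-- ===== SOURCE A (Python) =====
-- def get_centre(distance_matrix):
--     minimal_distance_sum = sum(distance_matrix[0])
--     centre = 0
--
--     it = 0
--     #Szukamy minimalnej sumy po wierszach macierzy
--     for node in distance_matrix:
--         if sum(node) < minimal_distance_sum:
--             minimal_distance_sum = sum(node)
--             centre = it
--         it += 1
--
--     #Zwracamy krotke (centrum, suma_dystansow)
--     return centre, minimal_distance_sum
-- ===== SOURCE B (Python) =====
-- def get_centre(distance_matrix):
--     # Two-phase: build the table of row sums, then pick the first minimum.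
--     row_sums = [sum(row) for row in distance_matrix]
--     minimal_distance_sum = min(row_sums)
--     return row_sums.index(minimal_distance_sum), minimal_distance_sum
-- ===== Notes on version B (the rewrite author's own statement) =====
-- stated objective: simpler
-- what changed: A keeps a running minimum and a manual index counter in one pass; B builds the list of row sums once, then uses min and list.index to pick the first minimal row (build-table-then-scan decomposition).
-- outside the precondition, e.g. on get_centre([]): A raises IndexError, B raises ValueError
import Mathlib
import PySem

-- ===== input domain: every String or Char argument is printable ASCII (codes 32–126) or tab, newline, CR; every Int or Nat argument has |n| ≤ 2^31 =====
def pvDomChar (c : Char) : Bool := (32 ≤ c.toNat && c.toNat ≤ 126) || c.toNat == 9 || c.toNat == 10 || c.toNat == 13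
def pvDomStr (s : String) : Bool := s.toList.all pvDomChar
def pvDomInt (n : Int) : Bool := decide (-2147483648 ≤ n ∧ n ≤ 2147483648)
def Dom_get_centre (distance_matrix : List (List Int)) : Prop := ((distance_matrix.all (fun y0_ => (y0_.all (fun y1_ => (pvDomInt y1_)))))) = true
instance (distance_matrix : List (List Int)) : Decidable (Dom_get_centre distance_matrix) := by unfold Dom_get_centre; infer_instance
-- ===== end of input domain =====

-- B replaces A's single running-min pass (manual index counter) by building the row-sum
-- table once and scanning it with min / index; objective: simpler decomposition.


-- ===== PORT A =====
def get_centre (distance_matrix : List (List Int)) : Int × Int :=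
  let minimal0 : Int := ((PySem.List.pyGet? distance_matrix 0).getD []).sum
  let st := distance_matrix.foldl
    (fun (s : Int × Int × Int) node =>
      let m := s.1; let c := s.2.1; let it := s.2.2
      if node.sum < m then (node.sum, it, it + 1) else (m, c, it + 1))
    (minimal0, 0, 0)
  (st.2.1, st.1)

-- ===== PORT B =====
def get_centre_alt (distance_matrix : List (List Int)) : Int × Int :=
  let row_sums := distance_matrix.map List.sum
  match PySem.List.min? row_sums (fun x => x) with
  | none => (0, 0)   -- unreachable under Pre_: Python's min([]) raises ValueError
  | some m => (((PySem.List.index? row_sums m).getD 0 : Nat), m)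

-- ===== PRECONDITION & SPEC =====
-- A raises IndexError on the empty matrix (distance_matrix[0]); B raises ValueError there (min([])).
def Pre_get_centre (distance_matrix : List (List Int)) : Prop := distance_matrix ≠ []
instance (distance_matrix : List (List Int)) : Decidable (Pre_get_centre distance_matrix) := by unfold Pre_get_centre; infer_instance
def pvWitness_get_centre : List (List Int) := [[0, 1], [1, 0]]
def Spec_get_centre (distance_matrix : List (List Int)) (out : Int × Int) : Prop := out = get_centre_alt distance_matrix
instance (distance_matrix : List (List Int)) (out : Int × Int) : Decidable (Spec_get_centre distance_matrix out) := by unfold Spec_get_centre; infer_instance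

-- ===== CLAIM (what is proved, stated in full; the proofs are below) =====
def Claim_equal_get_centre : Prop := ∀ (distance_matrix : List (List Int)), Dom_get_centre distance_matrix → Pre_get_centre distance_matrix → Spec_get_centre distance_matrix (get_centre distance_matrix)

-- ===== LEMMAS AND PROOFS =====

-- A's loop step, on the row sums
def pvStep (s : Int × Int × Int) (x : Int) : Int × Int × Int :=
  if x < s.1 then (x, s.2.2, s.2.2 + 1) else (s.1, s.2.1, s.2.2 + 1)

lemma foldl_min_le (t : List Int) (m : Int) : t.foldl min m ≤ m := by
  induction t generalizing m with
  | nil => simp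
  | cons x t ih => exact le_trans (ih (min m x)) (min_le_left m x)

lemma foldl_min_mem (t : List Int) (m : Int) : t.foldl min m = m ∨ t.foldl min m ∈ t := by
  induction t generalizing m with
  | nil => simp
  | cons x t ih =>
    rw [List.foldl_cons]
    rcases ih (min m x) with h | h
    · rcases le_total m x with hx | hx
      · left; rw [h, min_eq_left hx]
      · right; rw [h, min_eq_right hx]; exact List.mem_cons_self
    · right; exact List.mem_cons_of_mem _ h

-- characterisation of A's fold
lemma foldA_char (t : List Int) (m c it : Int) :
    t.foldl pvStep (m, c, it) =
      (t.foldl min m,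
       (if t.foldl min m < m
          then it + ((PySem.List.index? t (t.foldl min m)).getD 0 : Nat)
          else c),
       it + t.length) := by
  induction t generalizing m c it with
  | nil => simp
  | cons x t ih =>
    by_cases hx : x < m
    · -- update: state becomes (x, it, it+1)
      have hmin : min m x = x := min_eq_right hx.le
      have hstep : pvStep (m, c, it) x = (x, it, it + 1) := by simp [pvStep, hx]
      rw [List.foldl_cons, hstep, ih]
      simp only [List.foldl_cons, hmin]
      have hv : t.foldl min x ≤ x := foldl_min_le t x
      by_cases hvx : t.foldl min x < x
      · have hne : x ≠ t.foldl min x := ne_of_gt hvx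
        have hmem : t.foldl min x ∈ t := by
          rcases foldl_min_mem t x with h | h
          · rw [h] at hvx; exact absurd hvx (lt_irrefl x)
          · exact h
        obtain ⟨k, hk⟩ := Option.isSome_iff_exists.mp
          ((PySem.List.index?_isSome_iff t (t.foldl min x)).mpr hmem)
        rw [PySem.List.index?_cons_of_ne _ hne, hk]
        have hvm : t.foldl min x < m := lt_trans hvx hx
        simp only [hvx, hvm, if_pos, Option.map_some, Option.getD_some, List.length_cons,
          Prod.mk.injEq, true_and]
        constructor
        · push_cast; ring
        · push_cast; ring
      · have hv' : t.foldl min x = x := le_antisymm hv (not_lt.mp hvx)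
        rw [hv', PySem.List.index?_cons_self]
        simp [hx]
        ring
    · -- no update: state stays (m, c), it+1
      have hmin : min m x = m := min_eq_left (not_lt.mp hx)
      have hstep : pvStep (m, c, it) x = (m, c, it + 1) := by simp [pvStep, hx]
      rw [List.foldl_cons, hstep, ih]
      simp only [List.foldl_cons, hmin]
      by_cases hvm : t.foldl min m < m
      · have hne : x ≠ t.foldl min m := by
          intro h; rw [← h] at hvm; exact absurd (lt_of_lt_of_le hvm (not_lt.mp hx)) (lt_irrefl x)
        have hmem : t.foldl min m ∈ t := by
          rcases foldl_min_mem t m with h | h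
          · rw [h] at hvm; exact absurd hvm (lt_irrefl m)
          · exact h
        obtain ⟨k, hk⟩ := Option.isSome_iff_exists.mp
          ((PySem.List.index?_isSome_iff t (t.foldl min m)).mpr hmem)
        rw [PySem.List.index?_cons_of_ne _ hne, hk]
        simp only [hvm, if_pos, Option.map_some, Option.getD_some, List.length_cons,
          Prod.mk.injEq, true_and]
        constructor
        · push_cast; ring
        · push_cast; ring
      · simp only [hvm, if_neg, List.length_cons, Prod.mk.injEq, true_and, not_false_iff]
        push_cast; ring

-- ===== VERDICT (by name: the statement is the Claim_ definition above) =====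
theorem get_centre_spec : Claim_equal_get_centre := by
  intro dm _ hpre
  cases dm with
  | nil => exact absurd rfl hpre
  | cons r0 rs =>
    unfold Spec_get_centre get_centre get_centre_alt
    have hget : (PySem.List.pyGet? (r0 :: rs) 0).getD [] = r0 := by
      simp [PySem.List.pyGet?, PySem.List.pyIdx?]
    simp only [List.map_cons, PySem.List.min?_id_cons, hget]
    -- A's fold over rows equals the fold of pvStep over the row sums
    have hmap : (r0 :: rs).foldl
        (fun (s : Int × Int × Int) node =>
          if node.sum < s.1 then (node.sum, s.2.2, s.2.2 + 1) else (s.1, s.2.1, s.2.2 + 1))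
        (r0.sum, 0, 0)
        = ((r0 :: rs).map List.sum).foldl pvStep (r0.sum, 0, 0) := by
      rw [List.foldl_map]
      rfl
    simp only [hmap, List.map_cons]
    rw [List.foldl_cons]
    have h0 : pvStep (r0.sum, 0, 0) r0.sum = (r0.sum, 0, 1) := by
      simp [pvStep]
    rw [h0, foldA_char]
    set v := (rs.map List.sum).foldl min r0.sum with hv
    have hle : v ≤ r0.sum := foldl_min_le _ _
    by_cases hvlt : v < r0.sum
    · have hne : r0.sum ≠ v := fun h => absurd hvlt (by rw [← h]; exact lt_irrefl _)
      have hmem : v ∈ rs.map List.sum := by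
        rcases foldl_min_mem (rs.map List.sum) r0.sum with h | h
        · exact absurd (hv ▸ h ▸ hvlt) (lt_irrefl _)
        · exact h
      obtain ⟨k, hk⟩ := Option.isSome_iff_exists.mp
        ((PySem.List.index?_isSome_iff (rs.map List.sum) v).mpr hmem)
      rw [PySem.List.index?_cons_of_ne _ hne, hk]
      simp only [hvlt, if_pos, Option.map_some, Option.getD_some, Prod.mk.injEq, and_true]
      push_cast; ring
    · have hv' : v = r0.sum := le_antisymm hle (not_lt.mp hvlt)
      rw [hv', PySem.List.index?_cons_self]
      simp
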